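-- pv_equiv track=rewrite | github.com/rebecamdrs/teste-miller-rabin | src/teste-primalidade/preteste.py | pre_teste
-- ===== SOURCE A (Python) =====
-- def pre_teste(numero):
--     if numero < 2:
--         return False
--
--     primos_pequenos = {2, 3, 5, 7, 11, 13, 17, 19, 23, 29, 31, 37, 41, 43, 47, 53, 59, 61, 67, 71, 73, 79, 83, 89, 97}
--
--     if numero in primos_pequenos:
--         return True
--
--     for primo in primos_pequenos:
--         if numero % primo == 0:
--             return False
--     return True
-- ===== SOURCE B (Python) =====
-- # B: replace the 25 divisibility tests by one Euclidean gcd with the primorial.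
-- _PRIMOS_PEQUENOS = frozenset((2, 3, 5, 7, 11, 13, 17, 19, 23, 29, 31, 37, 41,
--                               43, 47, 53, 59, 61, 67, 71, 73, 79, 83, 89, 97))
-- _PRODUTO = 2305567963945518424753102147331756070  # product of the 25 small primes
--
--
-- def _gcd(a, b):
--     while b:
--         a, b = b, a % b
--     return a
--
--
-- def pre_teste(numero):
--     if numero < 2:
--         return False
--     if numero in _PRIMOS_PEQUENOS:
--         return True
--     return _gcd(numero, _PRODUTO) == 1
-- ===== Notes on version B (the rewrite author's own statement) =====
-- stated objective: idiomatic
-- what changed: The loop of 25 trial divisions 'numero % primo == 0' is replaced by a single Euclidean gcd of numero with the precomputed primorial of the 25 small primes; the <2 guard and the small-prime membership test are kept.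
import Mathlib
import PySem

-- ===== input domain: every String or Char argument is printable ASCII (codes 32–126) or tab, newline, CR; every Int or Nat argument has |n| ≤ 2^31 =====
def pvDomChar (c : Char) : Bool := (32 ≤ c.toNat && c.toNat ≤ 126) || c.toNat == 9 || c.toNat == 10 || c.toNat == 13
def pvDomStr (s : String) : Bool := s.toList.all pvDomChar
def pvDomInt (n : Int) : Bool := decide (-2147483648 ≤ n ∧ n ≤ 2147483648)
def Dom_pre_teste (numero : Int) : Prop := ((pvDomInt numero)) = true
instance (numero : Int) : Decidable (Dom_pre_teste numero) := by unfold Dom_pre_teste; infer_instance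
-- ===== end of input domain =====

-- B replaces A's loop of 25 trial divisions by one Euclidean gcd with the precomputed
-- primorial of the 25 small primes (objective: idiomatic / alternative algorithm).


-- ===== PORT A =====
-- the small-prime set literal of A
def pvPrimosPequenos : PySem.Set Int :=
  PySem.Set.ofList [2, 3, 5, 7, 11, 13, 17, 19, 23, 29, 31, 37, 41, 43, 47,
                    53, 59, 61, 67, 71, 73, 79, 83, 89, 97]

-- 'for primo in primos_pequenos: if numero % primo == 0: return False' / 'return True'
-- (the result does not depend on the set's iteration order: any divisor yields False)
def pvLoopA (numero : Int) : List Int → Bool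
  | [] => true
  | p :: ps => if PySem.Int.mod numero p = 0 then false else pvLoopA numero ps

def pre_teste (numero : Int) : Bool :=
  if numero < 2 then false
  else if PySem.Set.contains pvPrimosPequenos numero then true
  else pvLoopA numero pvPrimosPequenos

-- ===== PORT B =====
def pvProduto : Int := 2305567963945518424753102147331756070

-- while b: a, b = b, a % b ; return a
def pvGcd (a b : Int) : Int :=
  if h : b = 0 then a else pvGcd b (PySem.Int.mod a b)
termination_by b.natAbs
decreasing_by
  rcases lt_trichotomy b 0 with hb | hb | hb
  · have := PySem.Int.mod_neg_bounds a hb; omega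
  · exact absurd hb h
  · have h1 := PySem.Int.mod_nonneg a hb
    have h2 := PySem.Int.mod_lt a hb
    omega

def pre_teste_alt (numero : Int) : Bool :=
  if numero < 2 then false
  else if PySem.Set.contains pvPrimosPequenos numero then true
  else pvGcd numero pvProduto = 1

-- ===== PRECONDITION & SPEC =====
def Spec_pre_teste (numero : Int) (out : Bool) : Prop := out = pre_teste_alt numero
instance (numero : Int) (out : Bool) : Decidable (Spec_pre_teste numero out) := by unfold Spec_pre_teste; infer_instance

-- ===== CLAIM (what is proved, stated in full; the proofs are below) =====
def Claim_equal_pre_teste : Prop := ∀ (numero : Int), Dom_pre_teste numero → Spec_pre_teste numero (pre_teste numero)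

-- ===== LEMMAS AND PROOFS =====

-- the Euclidean loop computes Int.gcd on nonnegative inputs
theorem pvGcd_eq_gcd (a b : Int) (ha : 0 ≤ a) (hb : 0 ≤ b) : pvGcd a b = (Int.gcd a b : Int) := by
  obtain ⟨m, rfl⟩ := Int.eq_ofNat_of_zero_le ha
  obtain ⟨k, rfl⟩ := Int.eq_ofNat_of_zero_le hb
  clear ha hb
  induction k using Nat.strong_induction_on generalizing m with
  | _ k ih =>
    by_cases hk : (k : Int) = 0
    · have hk0 : k = 0 := by exact_mod_cast hk
      subst hk0
      rw [pvGcd]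
      simp [Int.gcd]
    · have hkn : k ≠ 0 := by exact_mod_cast hk
      rw [pvGcd, dif_neg hk, PySem.Int.mod_natCast]
      rw [ih (m % k) (Nat.mod_lt m (Nat.pos_of_ne_zero hkn)) k]
      have hgcd : Nat.gcd k (m % k) = Nat.gcd m k := by
        rw [Nat.gcd_comm k (m % k), ← Nat.gcd_rec k m, Nat.gcd_comm]
      simp only [Int.gcd, Int.natAbs_natCast, Nat.cast_inj]
      exact hgcd

-- loop = all primes fail to divide
theorem pvLoopA_eq_all (n : Int) (ps : List Int) :
    pvLoopA n ps = ps.all (fun p => decide (¬ p ∣ n)) := by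
  induction ps with
  | nil => rfl
  | cons p ps ih =>
    simp [pvLoopA, ih, PySem.Int.mod_eq_zero_iff_dvd]

-- coprimality with one prime is non-divisibility (stated over Int for the list side)
theorem pvCopr (n p : ℕ) (hp : p.Prime) : Nat.Coprime n p ↔ ¬ ((p : Int) ∣ (n : Int)) := by
  rw [Int.natCast_dvd_natCast, Nat.coprime_comm, hp.coprime_iff_not_dvd]

-- gcd with the primorial detects any small-prime factor
theorem pvKey (n : ℕ) :
    (pvPrimosPequenos.all (fun p => decide (¬ p ∣ (n : Int))) = true) ↔
      Nat.Coprime n 2305567963945518424753102147331756070 := by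
  have hP : (2305567963945518424753102147331756070 : ℕ) =
      2*3*5*7*11*13*17*19*23*29*31*37*41*43*47*53*59*61*67*71*73*79*83*89*97 := by norm_num
  rw [hP]
  simp only [Nat.coprime_mul_iff_right,
    pvCopr n 2 (by norm_num), pvCopr n 3 (by norm_num), pvCopr n 5 (by norm_num),
    pvCopr n 7 (by norm_num), pvCopr n 11 (by norm_num), pvCopr n 13 (by norm_num),
    pvCopr n 17 (by norm_num), pvCopr n 19 (by norm_num), pvCopr n 23 (by norm_num),
    pvCopr n 29 (by norm_num), pvCopr n 31 (by norm_num), pvCopr n 37 (by norm_num),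
    pvCopr n 41 (by norm_num), pvCopr n 43 (by norm_num), pvCopr n 47 (by norm_num),
    pvCopr n 53 (by norm_num), pvCopr n 59 (by norm_num), pvCopr n 61 (by norm_num),
    pvCopr n 67 (by norm_num), pvCopr n 71 (by norm_num), pvCopr n 73 (by norm_num),
    pvCopr n 79 (by norm_num), pvCopr n 83 (by norm_num), pvCopr n 89 (by norm_num),
    pvCopr n 97 (by norm_num)]
  have hlist : pvPrimosPequenos = [2, 3, 5, 7, 11, 13, 17, 19, 23, 29, 31, 37, 41,
      43, 47, 53, 59, 61, 67, 71, 73, 79, 83, 89, 97] := by decide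
  rw [hlist]
  simp only [List.all_cons, List.all_nil, Bool.and_eq_true, decide_eq_true_eq, and_true]
  push_cast
  tauto

-- ===== VERDICT (by name: the statement is the Claim_ definition above) =====
theorem pre_teste_spec : Claim_equal_pre_teste := by
  intro numero _
  unfold Spec_pre_teste pre_teste pre_teste_alt
  by_cases hlt : numero < 2
  · simp [hlt]
  · simp only [if_neg hlt]
    by_cases hmem : numero ∈ pvPrimosPequenos
    · simp [hmem]
    · simp only [PySem.Set.contains] at *
      simp only [hmem, decide_false, Bool.false_eq_true, if_false, List.contains_eq_mem]
      have h0 : 0 ≤ numero := by omega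
      lift numero to ℕ using h0 with n
      rw [pvLoopA_eq_all, pvGcd_eq_gcd _ _ (by positivity) (by norm_num [pvProduto])]
      have hgcd : Int.gcd (n : Int) pvProduto = Nat.gcd n 2305567963945518424753102147331756070 := by
        norm_num [pvProduto, Int.gcd]
      rw [hgcd]
      have hiff := pvKey n
      rcases Bool.eq_false_or_eq_true (pvPrimosPequenos.all (fun p => decide (¬ p ∣ (n : Int)))) with hb | hb <;>
        rw [hb]
      · have hc : Nat.gcd n 2305567963945518424753102147331756070 = 1 := hiff.mp hb
        simp [hc]
      · have hnc : Nat.gcd n 2305567963945518424753102147331756070 ≠ 1 := by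
          intro h1
          rw [hiff.mpr h1] at hb
          simp at hb
        have hnc' : ((Nat.gcd n 2305567963945518424753102147331756070 : ℕ) : Int) ≠ 1 := by
          exact_mod_cast hnc
        simp [hnc']
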